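-- pv_equiv track=rewrite | github.com/ReallyBoard123/esco-skill-extractor | api/core/gemma_provider.py | _parse_recommendations_response
-- ===== SOURCE A (Python) =====
-- from typing import Dict, List, Optional, Any, Tuple
--
-- def _parse_recommendations_response(response: str) -> List[str]:
--     """Parse Gemma3's recommendations into a list"""
--     recommendations = []
--     current_rec = {}
--
--     for line in response.split('\n'):
--         line = line.strip()
--
--         if line.startswith('RECOMMENDATION:'):
--             if current_rec.get('action'):
--                 # Format previous recommendation
--                 rec_text = current_rec['action']
--                 if current_rec.get('timeline'):
--                     rec_text += f" (Timeline: {current_rec['timeline']})"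
--                 if current_rec.get('benefit'):
--                     rec_text += f" - {current_rec['benefit']}"
--                 recommendations.append(rec_text)
--
--             # Start new recommendation
--             current_rec = {
--                 'action': line.replace('RECOMMENDATION:', '').strip()
--             }
--
--         elif line.startswith('TIMELINE:') and current_rec:
--             current_rec['timeline'] = line.replace('TIMELINE:', '').strip()
--
--         elif line.startswith('BENEFIT:') and current_rec:
--             current_rec['benefit'] = line.replace('BENEFIT:', '').strip()
--
--     # Save last recommendation
--     if current_rec.get('action'):
--         rec_text = current_rec['action']
--         if current_rec.get('timeline'):
--             rec_text += f" (Timeline: {current_rec['timeline']})"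
--         if current_rec.get('benefit'):
--             rec_text += f" - {current_rec['benefit']}"
--         recommendations.append(rec_text)
--
--     return recommendations
-- ===== SOURCE B (Python) =====
-- def _parse_recommendations_response(response):
--     """Parse Gemma3's recommendations into a list (two-phase: collect records, then format)."""
--     records = []
--     for raw in response.split('\n'):
--         line = raw.strip()
--         if line.startswith('RECOMMENDATION:'):
--             records.append((line.replace('RECOMMENDATION:', '').strip(), None, None))
--         elif line.startswith('TIMELINE:'):
--             if records:
--                 a, _, b = records[-1]
--                 records[-1] = (a, line.replace('TIMELINE:', '').strip(), b)
--         elif line.startswith('BENEFIT:'):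
--             if records:
--                 a, t, _ = records[-1]
--                 records[-1] = (a, t, line.replace('BENEFIT:', '').strip())
--     out = []
--     for a, t, b in records:
--         if a:
--             text = a
--             if t:
--                 text += f" (Timeline: {t})"
--             if b:
--                 text += f" - {b}"
--             out.append(text)
--     return out
-- ===== Notes on version B (the rewrite author's own statement) =====
-- stated objective: simpler
-- what changed: Two-phase decomposition: first collect (action, timeline, benefit) record tuples while scanning the lines, then format every record with a truthy action in a second pass, eliminating A's duplicated flush-and-format block and its carried dict state.
import Mathlib
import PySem

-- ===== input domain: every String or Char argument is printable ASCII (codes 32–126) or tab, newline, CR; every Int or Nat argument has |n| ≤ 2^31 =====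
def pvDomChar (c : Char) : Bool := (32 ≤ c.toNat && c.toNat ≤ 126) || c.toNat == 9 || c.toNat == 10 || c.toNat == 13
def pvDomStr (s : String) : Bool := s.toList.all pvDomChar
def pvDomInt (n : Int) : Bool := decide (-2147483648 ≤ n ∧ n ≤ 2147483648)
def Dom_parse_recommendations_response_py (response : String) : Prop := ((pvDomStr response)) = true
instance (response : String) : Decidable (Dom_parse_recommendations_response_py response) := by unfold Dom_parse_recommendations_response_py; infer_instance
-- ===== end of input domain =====

-- B: two-phase decomposition — collect (action, timeline, benefit) records, then format them;
-- same results as A, which flushes inline with a duplicated format block (objective: simpler).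


-- ===== PORT A =====

-- the duplicated flush/format block of A (reads current_rec's keys with Python truthiness)
def pvFmtA (cur : PySem.Dict String String) : String :=
  let t0 := cur.getD "action" ""
  let t1 := if cur.getD "timeline" "" ≠ "" then t0 ++ " (Timeline: " ++ cur.getD "timeline" "" ++ ")" else t0
  if cur.getD "benefit" "" ≠ "" then t1 ++ " - " ++ cur.getD "benefit" "" else t1

-- one iteration of A's for-loop; state = (recommendations, current_rec)
def pvStepA (st : List String × PySem.Dict String String) (raw : String) :
    List String × PySem.Dict String String :=
  let line := PySem.Str.strip raw
  if PySem.Str.startswith line "RECOMMENDATION:" then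
    let recs := if st.2.getD "action" "" ≠ "" then st.1 ++ [pvFmtA st.2] else st.1
    (recs, PySem.Dict.empty.insert "action" (PySem.Str.strip (PySem.Str.replace line "RECOMMENDATION:" "")))
  else if PySem.Str.startswith line "TIMELINE:" && st.2.size != 0 then
    (st.1, st.2.insert "timeline" (PySem.Str.strip (PySem.Str.replace line "TIMELINE:" "")))
  else if PySem.Str.startswith line "BENEFIT:" && st.2.size != 0 then
    (st.1, st.2.insert "benefit" (PySem.Str.strip (PySem.Str.replace line "BENEFIT:" "")))
  else st

def parse_recommendations_response_py (response : String) : List String :=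
  let st := ((PySem.Str.split? response "\n").getD []).foldl pvStepA ([], PySem.Dict.empty)
  if st.2.getD "action" "" ≠ "" then st.1 ++ [pvFmtA st.2] else st.1

-- ===== PORT B =====

-- a record is (action, timeline?, benefit?)
def pvFmtB (r : String × Option String × Option String) : String :=
  let t1 := match r.2.1 with
    | some t => if t ≠ "" then r.1 ++ " (Timeline: " ++ t ++ ")" else r.1
    | none => r.1
  match r.2.2 with
    | some b => if b ≠ "" then t1 ++ " - " ++ b else t1
    | none => t1

-- phase 1: one iteration collecting records (records[-1] update = dropLast ++ [updated last])
def pvStepB (rs : List (String × Option String × Option String)) (raw : String) :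
    List (String × Option String × Option String) :=
  let line := PySem.Str.strip raw
  if PySem.Str.startswith line "RECOMMENDATION:" then
    rs ++ [(PySem.Str.strip (PySem.Str.replace line "RECOMMENDATION:" ""), none, none)]
  else if PySem.Str.startswith line "TIMELINE:" then
    match rs.getLast? with
    | none => rs
    | some r => rs.dropLast ++ [(r.1, some (PySem.Str.strip (PySem.Str.replace line "TIMELINE:" "")), r.2.2)]
  else if PySem.Str.startswith line "BENEFIT:" then
    match rs.getLast? with
    | none => rs
    | some r => rs.dropLast ++ [(r.1, r.2.1, some (PySem.Str.strip (PySem.Str.replace line "BENEFIT:" "")))]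
  else rs

-- phase 2: format every record whose action is truthy
def pvEmit (rs : List (String × Option String × Option String)) : List String :=
  rs.foldl (fun acc r => if r.1 ≠ "" then acc ++ [pvFmtB r] else acc) []

def parse_recommendations_response_py_alt (response : String) : List String :=
  pvEmit (((PySem.Str.split? response "\n").getD []).foldl pvStepB [])

-- ===== PRECONDITION & SPEC =====
def Spec_parse_recommendations_response_py (response : String) (out : List String) : Prop := out = parse_recommendations_response_py_alt response
instance (response : String) (out : List String) : Decidable (Spec_parse_recommendations_response_py response out) := by unfold Spec_parse_recommendations_response_py; infer_instance

-- ===== CLAIM (what is proved, stated in full; the proofs are below) =====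
def Claim_equal_parse_recommendations_response_py : Prop := ∀ (response : String), Dom_parse_recommendations_response_py response → Spec_parse_recommendations_response_py response (parse_recommendations_response_py response)

-- ===== LEMMAS AND PROOFS =====

-- A's current_rec corresponds to B's last record: the three lookups agree
def pvRelCur (cur : PySem.Dict String String) (r : String × Option String × Option String) : Prop :=
  cur.get? "action" = some r.1 ∧ cur.get? "timeline" = r.2.1 ∧ cur.get? "benefit" = r.2.2

-- the coupling invariant between A's loop state and B's record list
def pvInv (st : List String × PySem.Dict String String)
    (rs : List (String × Option String × Option String)) : Prop :=
  st.1 = pvEmit rs.dropLast ∧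
  ((rs = [] ∧ st.2 = PySem.Dict.empty) ∨ (∃ r, rs.getLast? = some r ∧ pvRelCur st.2 r))

theorem pvFmt_eq (cur : PySem.Dict String String) (r : String × Option String × Option String)
    (h : pvRelCur cur r) : pvFmtA cur = pvFmtB r := by
  obtain ⟨a, t?, b?⟩ := r
  obtain ⟨h1, h2, h3⟩ := h
  cases t? <;> cases b? <;>
    simp_all [pvFmtA, pvFmtB, PySem.Dict.getD_eq_get?_getD]

theorem pv_size_ne (cur : PySem.Dict String String) (a : String) (h : cur.get? "action" = some a) :
    (cur.size != 0) = true := by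
  rcases cur with ⟨items⟩
  cases items with
  | nil => simp [PySem.Dict.get?] at h
  | cons p t => simp [PySem.Dict.size]

theorem pvEmit_concat (l : List (String × Option String × Option String))
    (r : String × Option String × Option String) :
    pvEmit (l ++ [r]) = if r.1 ≠ "" then pvEmit l ++ [pvFmtB r] else pvEmit l := by
  simp [pvEmit, List.foldl_append]

-- characterizations of one A-step, by which branch of the elif chain fires
theorem pvStepA_rec (st : List String × PySem.Dict String String) (raw : String)
    (hR : PySem.Str.startswith (PySem.Str.strip raw) "RECOMMENDATION:" = true) :
    pvStepA st raw = (if st.2.getD "action" "" ≠ "" then st.1 ++ [pvFmtA st.2] else st.1,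
      PySem.Dict.empty.insert "action"
        (PySem.Str.strip (PySem.Str.replace (PySem.Str.strip raw) "RECOMMENDATION:" ""))) := by
  simp only [pvStepA]; rw [if_pos hR]

theorem pvStepA_tl (st : List String × PySem.Dict String String) (raw : String)
    (hR : PySem.Str.startswith (PySem.Str.strip raw) "RECOMMENDATION:" = false)
    (hT : PySem.Str.startswith (PySem.Str.strip raw) "TIMELINE:" = true)
    (hsz : (st.2.size != 0) = true) :
    pvStepA st raw = (st.1, st.2.insert "timeline"
      (PySem.Str.strip (PySem.Str.replace (PySem.Str.strip raw) "TIMELINE:" ""))) := by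
  simp only [pvStepA]
  rw [if_neg (by rw [hR]; simp), if_pos (by rw [hT, hsz]; decide)]

theorem pvStepA_ben (st : List String × PySem.Dict String String) (raw : String)
    (hR : PySem.Str.startswith (PySem.Str.strip raw) "RECOMMENDATION:" = false)
    (hT : PySem.Str.startswith (PySem.Str.strip raw) "TIMELINE:" = false)
    (hB : PySem.Str.startswith (PySem.Str.strip raw) "BENEFIT:" = true)
    (hsz : (st.2.size != 0) = true) :
    pvStepA st raw = (st.1, st.2.insert "benefit"
      (PySem.Str.strip (PySem.Str.replace (PySem.Str.strip raw) "BENEFIT:" ""))) := by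
  simp only [pvStepA]
  rw [if_neg (by rw [hR]; simp), if_neg (by rw [hT]; simp), if_pos (by rw [hB, hsz]; decide)]

theorem pvStepA_skip_sz (st : List String × PySem.Dict String String) (raw : String)
    (hR : PySem.Str.startswith (PySem.Str.strip raw) "RECOMMENDATION:" = false)
    (hsz : (st.2.size != 0) = false) :
    pvStepA st raw = st := by
  simp only [pvStepA]
  rw [if_neg (by rw [hR]; simp), if_neg (by rw [hsz]; simp), if_neg (by rw [hsz]; simp)]

theorem pvStepA_else (st : List String × PySem.Dict String String) (raw : String)
    (hR : PySem.Str.startswith (PySem.Str.strip raw) "RECOMMENDATION:" = false)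
    (hT : PySem.Str.startswith (PySem.Str.strip raw) "TIMELINE:" = false)
    (hB : PySem.Str.startswith (PySem.Str.strip raw) "BENEFIT:" = false) :
    pvStepA st raw = st := by
  simp only [pvStepA]
  rw [if_neg (by rw [hR]; simp), if_neg (by rw [hT]; simp), if_neg (by rw [hB]; simp)]

-- characterizations of one B-step
theorem pvStepB_rec (rs : List (String × Option String × Option String)) (raw : String)
    (hR : PySem.Str.startswith (PySem.Str.strip raw) "RECOMMENDATION:" = true) :
    pvStepB rs raw = rs ++
      [(PySem.Str.strip (PySem.Str.replace (PySem.Str.strip raw) "RECOMMENDATION:" ""), none, none)] := by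
  simp only [pvStepB]; rw [if_pos hR]

theorem pvStepB_tl_nil (raw : String)
    (hR : PySem.Str.startswith (PySem.Str.strip raw) "RECOMMENDATION:" = false) :
    pvStepB [] raw = [] := by
  simp only [pvStepB]
  rw [if_neg (by rw [hR]; simp)]
  split_ifs <;> rfl

theorem pvStepB_tl_concat (l : List (String × Option String × Option String))
    (r : String × Option String × Option String) (raw : String)
    (hR : PySem.Str.startswith (PySem.Str.strip raw) "RECOMMENDATION:" = false)
    (hT : PySem.Str.startswith (PySem.Str.strip raw) "TIMELINE:" = true) :
    pvStepB (l ++ [r]) raw = l ++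
      [(r.1, some (PySem.Str.strip (PySem.Str.replace (PySem.Str.strip raw) "TIMELINE:" "")), r.2.2)] := by
  simp only [pvStepB]
  rw [if_neg (by rw [hR]; simp), if_pos hT, List.getLast?_concat, List.dropLast_concat]

theorem pvStepB_ben_concat (l : List (String × Option String × Option String))
    (r : String × Option String × Option String) (raw : String)
    (hR : PySem.Str.startswith (PySem.Str.strip raw) "RECOMMENDATION:" = false)
    (hT : PySem.Str.startswith (PySem.Str.strip raw) "TIMELINE:" = false)
    (hB : PySem.Str.startswith (PySem.Str.strip raw) "BENEFIT:" = true) :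
    pvStepB (l ++ [r]) raw = l ++
      [(r.1, r.2.1, some (PySem.Str.strip (PySem.Str.replace (PySem.Str.strip raw) "BENEFIT:" "")))] := by
  simp only [pvStepB]
  rw [if_neg (by rw [hR]; simp), if_neg (by rw [hT]; simp), if_pos hB,
    List.getLast?_concat, List.dropLast_concat]

theorem pvStepB_else (rs : List (String × Option String × Option String)) (raw : String)
    (hR : PySem.Str.startswith (PySem.Str.strip raw) "RECOMMENDATION:" = false)
    (hT : PySem.Str.startswith (PySem.Str.strip raw) "TIMELINE:" = false)
    (hB : PySem.Str.startswith (PySem.Str.strip raw) "BENEFIT:" = false) :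
    pvStepB rs raw = rs := by
  simp only [pvStepB]
  rw [if_neg (by rw [hR]; simp), if_neg (by rw [hT]; simp), if_neg (by rw [hB]; simp)]

-- the final flush of A equals B's full second phase, given the invariant
theorem pvFinal_eq (st : List String × PySem.Dict String String)
    (rs : List (String × Option String × Option String)) (h : pvInv st rs) :
    (if st.2.getD "action" "" ≠ "" then st.1 ++ [pvFmtA st.2] else st.1) = pvEmit rs := by
  obtain ⟨h1, h2⟩ := h
  rcases List.eq_nil_or_concat rs with rfl | ⟨l, r, rfl⟩
  · rcases h2 with ⟨-, hcur⟩ | ⟨r, hlast, -⟩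
    · rw [hcur, if_neg (by simp [PySem.Dict.getD_empty])]
      exact h1
    · simp at hlast
  · rw [List.concat_eq_append] at h1 h2 ⊢
    rcases h2 with ⟨hnil, -⟩ | ⟨r', hlast, hrel⟩
    · simp at hnil
    · rw [List.getLast?_concat] at hlast
      have hrr := Option.some.inj hlast
      subst hrr
      obtain ⟨ha, ht, hb⟩ := hrel
      rw [List.dropLast_concat] at h1
      rw [pvEmit_concat, PySem.Dict.getD_eq_get?_getD, ha, pvFmt_eq st.2 r ⟨ha, ht, hb⟩, h1]
      simp

-- RelCur for a freshly started record {'action': a0}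
theorem pvRelCur_new (a0 : String) :
    pvRelCur (PySem.Dict.empty.insert "action" a0) (a0, none, none) := by
  refine ⟨?_, ?_, ?_⟩ <;>
    simp [PySem.Dict.get?_insert, PySem.Dict.get?_empty]

-- one step preserves the invariant
theorem pvStep_inv (st : List String × PySem.Dict String String)
    (rs : List (String × Option String × Option String)) (h : pvInv st rs) (raw : String) :
    pvInv (pvStepA st raw) (pvStepB rs raw) := by
  obtain ⟨h1, h2⟩ := h
  cases hR : PySem.Str.startswith (PySem.Str.strip raw) "RECOMMENDATION:" with
  | true =>
    rw [pvStepA_rec st raw hR, pvStepB_rec rs raw hR]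
    refine ⟨?_, Or.inr ⟨_, List.getLast?_concat, pvRelCur_new _⟩⟩
    rw [List.dropLast_concat]
    exact pvFinal_eq st rs ⟨h1, h2⟩
  | false =>
    cases hT : PySem.Str.startswith (PySem.Str.strip raw) "TIMELINE:" with
    | true =>
      rcases List.eq_nil_or_concat rs with rfl | ⟨l, r, rfl⟩
      · rcases h2 with ⟨-, hcur⟩ | ⟨r, hlast, -⟩
        · have hsz : (st.2.size != 0) = false := by rw [hcur]; rfl
          rw [pvStepA_skip_sz st raw hR hsz, pvStepB_tl_nil raw hR]
          exact ⟨h1, Or.inl ⟨rfl, hcur⟩⟩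
        · simp at hlast
      · rw [List.concat_eq_append] at h1 h2 ⊢
        rcases h2 with ⟨hnil, -⟩ | ⟨r', hlast, hrel⟩
        · simp at hnil
        · rw [List.getLast?_concat] at hlast
          have hrr := Option.some.inj hlast
          subst hrr
          obtain ⟨ha, ht, hb⟩ := hrel
          rw [pvStepA_tl st raw hR hT (pv_size_ne st.2 r.1 ha),
            pvStepB_tl_concat l r raw hR hT]
          refine ⟨?_, Or.inr ⟨_, List.getLast?_concat, ?_, ?_, ?_⟩⟩
          · rw [List.dropLast_concat]
            rw [List.dropLast_concat] at h1
            exact h1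
          · simpa [PySem.Dict.get?_insert] using ha
          · simp
          · simpa [PySem.Dict.get?_insert] using hb
    | false =>
      cases hB : PySem.Str.startswith (PySem.Str.strip raw) "BENEFIT:" with
      | true =>
        rcases List.eq_nil_or_concat rs with rfl | ⟨l, r, rfl⟩
        · rcases h2 with ⟨-, hcur⟩ | ⟨r, hlast, -⟩
          · have hsz : (st.2.size != 0) = false := by rw [hcur]; rfl
            rw [pvStepA_skip_sz st raw hR hsz, pvStepB_tl_nil raw hR]
            exact ⟨h1, Or.inl ⟨rfl, hcur⟩⟩
          · simp at hlast
        · rw [List.concat_eq_append] at h1 h2 ⊢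
          rcases h2 with ⟨hnil, -⟩ | ⟨r', hlast, hrel⟩
          · simp at hnil
          · rw [List.getLast?_concat] at hlast
            have hrr := Option.some.inj hlast
            subst hrr
            obtain ⟨ha, ht, hb⟩ := hrel
            rw [pvStepA_ben st raw hR hT hB (pv_size_ne st.2 r.1 ha),
              pvStepB_ben_concat l r raw hR hT hB]
            refine ⟨?_, Or.inr ⟨_, List.getLast?_concat, ?_, ?_, ?_⟩⟩
            · rw [List.dropLast_concat]
              rw [List.dropLast_concat] at h1
              exact h1
            · simpa [PySem.Dict.get?_insert] using ha
            · simpa [PySem.Dict.get?_insert] using ht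
            · simp
      | false =>
        rw [pvStepA_else st raw hR hT hB, pvStepB_else rs raw hR hT hB]
        exact ⟨h1, h2⟩

theorem pvFoldl_inv (lines : List String) :
    ∀ (st : List String × PySem.Dict String String)
      (rs : List (String × Option String × Option String)), pvInv st rs →
      pvInv (lines.foldl pvStepA st) (lines.foldl pvStepB rs) := by
  induction lines with
  | nil => intro st rs h; exact h
  | cons x xs ih =>
    intro st rs h
    rw [List.foldl_cons, List.foldl_cons]
    exact ih _ _ (pvStep_inv st rs h x)

-- ===== VERDICT (by name: the statement is the Claim_ definition above) =====
theorem pvInv_init : pvInv ([], PySem.Dict.empty) [] := by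
  unfold pvInv
  exact ⟨rfl, Or.inl ⟨rfl, rfl⟩⟩

set_option maxHeartbeats 1000000 in
theorem parse_recommendations_response_py_spec : Claim_equal_parse_recommendations_response_py := by
  intro response _
  show parse_recommendations_response_py response = parse_recommendations_response_py_alt response
  unfold parse_recommendations_response_py parse_recommendations_response_py_alt
  exact pvFinal_eq _ _ (pvFoldl_inv ((PySem.Str.split? response "\n").getD []) _ _ pvInv_init)
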